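-- pv_equiv track=rewrite | github.com/pioushasan2305/sortOrders | test.py | get_interclass_combinations
-- ===== SOURCE A (Python) =====
-- def get_interclass_combinations(order):
--     interclass_combinations = set()
--     for i in range(len(order)):
--         for j in range(len(order)):
--             if i != j:  # Ensure we don't pair a method with itself
--                 class_i = order[i].split('.')[-2]
--                 class_j = order[j].split('.')[-2]
--
--                 if class_i != class_j:
--                     interclass_combinations.add((order[i], order[j]))
--     return interclass_combinations
-- ===== SOURCE B (Python) =====
-- def get_interclass_combinations(order):
--     # Partition-based approach: compute each element's class once, build for every
--     # distinct class the (ordered) list of elements of OTHER classes, then emit each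
--     # element paired with its precomputed partner list.  No per-pair label comparison.
--     if len(order) < 2:
--         return set()
--     classes = [m.split('.')[-2] for m in order]
--     tagged = list(zip(order, classes))
--     partners = {l: [b for b, lb in tagged if lb != l] for l in dict.fromkeys(classes)}
--     result = set()
--     for a, la in tagged:
--         result.update((a, b) for b in partners[la])
--     return result
-- ===== Notes on version B (the rewrite author's own statement) =====
-- stated objective: alternative
-- what changed: B partitions the input by class label: it computes each element's label once, builds one dict mapping every distinct label to the ordered list of other-class elements, and then emits each element paired with its precomputed partner list, instead of A's nested index loops that re-split and compare labels for every (i,j) pair.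
import Mathlib
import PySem

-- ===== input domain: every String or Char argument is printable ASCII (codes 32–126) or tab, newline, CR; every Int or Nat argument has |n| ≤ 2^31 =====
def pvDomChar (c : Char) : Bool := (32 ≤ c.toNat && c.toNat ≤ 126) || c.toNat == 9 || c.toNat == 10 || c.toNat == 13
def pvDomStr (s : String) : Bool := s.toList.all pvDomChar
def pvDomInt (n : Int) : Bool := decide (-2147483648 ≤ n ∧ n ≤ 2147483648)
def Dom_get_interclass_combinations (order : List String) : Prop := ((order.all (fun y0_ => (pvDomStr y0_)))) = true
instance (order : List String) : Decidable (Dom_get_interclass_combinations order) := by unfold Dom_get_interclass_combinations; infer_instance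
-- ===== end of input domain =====

-- B partitions the elements: each class label's list of other-class partners is built once,
-- then each element is paired with its precomputed partner list; same return value.


-- ===== PORT A =====
-- shared helper: m.split('.')[-2]; the IndexError case (element without '.') is excluded by
-- Pre_, so the .getD defaults are never the value either port's claim is about
def pvClassOf (m : String) : String :=
  (PySem.List.pyGet? ((PySem.Str.split? m ".").getD []) (-2)).getD ""

def get_interclass_combinations (order : List String) : List (String × String) :=
  (PySem.List.pyRange 0 (order.length : Int) 1).foldl (fun acc i =>
    (PySem.List.pyRange 0 (order.length : Int) 1).foldl (fun acc j =>
      if i ≠ j then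
        let class_i := pvClassOf (PySem.List.pyGetD order i "")
        let class_j := pvClassOf (PySem.List.pyGetD order j "")
        if class_i ≠ class_j then
          PySem.Set.add acc (PySem.List.pyGetD order i "", PySem.List.pyGetD order j "")
        else acc
      else acc) acc) PySem.Set.empty

-- ===== PORT B =====
def get_interclass_combinations_alt (order : List String) : List (String × String) :=
  if order.length < 2 then PySem.Set.empty
  else
    let classes := order.map (fun m => pvClassOf m)
    let tagged := order.zip classes
    -- dict comprehension over dict.fromkeys(classes) (first occurrences, in order)
    let partners : PySem.Dict String (List String) :=
      (PySem.List.dedup classes).foldl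
        (fun d l => d.insert l (tagged.filterMap (fun p => if p.2 ≠ l then some p.1 else none)))
        PySem.Dict.empty
    -- result.update((a, b) for b in partners[la])
    tagged.foldl (fun acc p =>
      (partners.getD p.2 []).foldl (fun acc b => PySem.Set.add acc (p.1, b)) acc)
      PySem.Set.empty

-- ===== PRECONDITION & SPEC =====
-- Pre_ excludes exactly the inputs where A raises IndexError: a list of length ≥ 2 with an
-- element containing no '.' (its split('.') has one piece, so [-2] fails).
def Pre_get_interclass_combinations (order : List String) : Prop :=
  order.length < 2 ∨ ∀ m ∈ order, '.' ∈ m.toList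
instance (order : List String) : Decidable (Pre_get_interclass_combinations order) := by
  unfold Pre_get_interclass_combinations; infer_instance

def pvWitness_get_interclass_combinations : List String := ["A.f", "B.g"]

def Spec_get_interclass_combinations (order : List String) (out : List (String × String)) : Prop := out = get_interclass_combinations_alt order
instance (order : List String) (out : List (String × String)) : Decidable (Spec_get_interclass_combinations order out) := by unfold Spec_get_interclass_combinations; infer_instance

-- ===== CLAIM (what is proved, stated in full; the proofs are below) =====
def Claim_equal_get_interclass_combinations : Prop := ∀ (order : List String), Dom_get_interclass_combinations order → Pre_get_interclass_combinations order → Spec_get_interclass_combinations order (get_interclass_combinations order)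

-- ===== LEMMAS AND PROOFS =====

-- a fold guarded by a decidable condition is a plain fold over the surviving images
theorem pv_foldl_guard {α β : Type} (l : List α) (c : α → Prop) [DecidablePred c]
    (g : α → β) (f : List β → β → List β) (init : List β) :
    l.foldl (fun acc x => if c x then f acc (g x) else acc) init
      = (l.filterMap (fun x => if c x then some (g x) else none)).foldl f init := by
  induction l generalizing init with
  | nil => rfl
  | cons a t ih => by_cases h : c a <;> simp [h, ih]

-- a fold whose body is itself a fold is a fold over the flattened list
theorem pv_foldl_foldl {α β γ : Type} (l : List α) (h : α → List β)
    (f : γ → β → γ) (init : γ) :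
    l.foldl (fun acc i => (h i).foldl f acc) init = (l.flatMap h).foldl f init := by
  induction l generalizing init with
  | nil => rfl
  | cons a t ih => simp [List.foldl_append, ih]

-- indexing over range(len(order)) is traversing order itself
theorem pv_range_filterMap {γ : Type} (order : List String) (H : String → Option γ) :
    (PySem.List.pyRange 0 (order.length : Int) 1).filterMap
      (fun j => H (PySem.List.pyGetD order j "")) = order.filterMap H := by
  conv_rhs => rw [← PySem.List.map_pyGetD_pyRange_zero' order ""]
  rw [List.filterMap_map]; rfl

theorem pv_range_flatMap {γ : Type} (order : List String) (H : String → List γ) :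
    (PySem.List.pyRange 0 (order.length : Int) 1).flatMap
      (fun i => H (PySem.List.pyGetD order i "")) = order.flatMap H := by
  conv_rhs => rw [← PySem.List.map_pyGetD_pyRange_zero' order ""]
  rw [List.flatMap_map]

-- zipping a list with its own image is tagging each element
theorem pv_zip_map {α β : Type} (l : List α) (f : α → β) :
    l.zip (l.map f) = l.map (fun a => (a, f a)) := by
  induction l with
  | nil => rfl
  | cons a t ih => simp [ih]

-- lookup in a dict built by inserting f k for each k of a Nodup key list
theorem pv_getD_foldl_insert_skip {ν : Type} (ks : List String) (f : String → ν)
    (d : PySem.Dict String ν) (l : String) (v : ν) (hl : l ∉ ks) :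
    (ks.foldl (fun d k => d.insert k (f k)) d).getD l v = d.getD l v := by
  induction ks generalizing d with
  | nil => rfl
  | cons k t ih =>
    simp only [List.mem_cons, not_or] at hl
    simp only [List.foldl_cons]
    rw [ih _ hl.2, PySem.Dict.getD_insert_of_ne d (f k) v hl.1]

theorem pv_getD_foldl_insert {ν : Type} (ks : List String) (f : String → ν)
    (d : PySem.Dict String ν) (l : String) (v : ν) (hl : l ∈ ks) (hn : ks.Nodup) :
    (ks.foldl (fun d k => d.insert k (f k)) d).getD l v = f l := by
  induction ks generalizing d with
  | nil => cases hl
  | cons k t ih =>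
    simp only [List.nodup_cons] at hn
    rcases List.mem_cons.mp hl with h | h
    · subst h
      simp only [List.foldl_cons]
      rw [pv_getD_foldl_insert_skip t f _ l v hn.1, PySem.Dict.getD_insert_self]
    · exact ih _ h hn.2

-- the pair sequence both ports feed into set-building, in the common insertion order
def pvSeq (order : List String) : List (String × String) :=
  order.flatMap (fun a =>
    order.filterMap (fun b => if pvClassOf a ≠ pvClassOf b then some (a, b) else none))

theorem A_eq_fold (order : List String) :
    get_interclass_combinations order = (pvSeq order).foldl PySem.Set.add PySem.Set.empty := by
  unfold get_interclass_combinations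
  have hinner : ∀ (i : Int) (acc : List (String × String)),
      ((PySem.List.pyRange 0 (order.length : Int) 1).foldl (fun acc j =>
        if i ≠ j then
          let class_i := pvClassOf (PySem.List.pyGetD order i "")
          let class_j := pvClassOf (PySem.List.pyGetD order j "")
          if class_i ≠ class_j then
            PySem.Set.add acc (PySem.List.pyGetD order i "", PySem.List.pyGetD order j "")
          else acc
        else acc) acc)
      = (order.filterMap (fun b =>
          if pvClassOf (PySem.List.pyGetD order i "") ≠ pvClassOf b
          then some (PySem.List.pyGetD order i "", b) else none)).foldl PySem.Set.add acc := by
    intro i acc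
    have h1 : (fun (acc : List (String × String)) (j : Int) =>
        if i ≠ j then
          let class_i := pvClassOf (PySem.List.pyGetD order i "")
          let class_j := pvClassOf (PySem.List.pyGetD order j "")
          if class_i ≠ class_j then
            PySem.Set.add acc (PySem.List.pyGetD order i "", PySem.List.pyGetD order j "")
          else acc
        else acc)
      = (fun acc j =>
        if pvClassOf (PySem.List.pyGetD order i "") ≠ pvClassOf (PySem.List.pyGetD order j "")
        then PySem.Set.add acc (PySem.List.pyGetD order i "", PySem.List.pyGetD order j "")
        else acc) := by
      funext acc j
      by_cases hij : i = j
      · subst hij; simp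
      · simp [hij]
    rw [h1,
      pv_foldl_guard _ (fun j => pvClassOf (PySem.List.pyGetD order i "") ≠ pvClassOf (PySem.List.pyGetD order j ""))
        (fun j => (PySem.List.pyGetD order i "", PySem.List.pyGetD order j "")) PySem.Set.add acc,
      pv_range_filterMap order (fun b =>
        if pvClassOf (PySem.List.pyGetD order i "") ≠ pvClassOf b
        then some (PySem.List.pyGetD order i "", b) else none)]
  rw [show (fun (acc : List (String × String)) (i : Int) =>
      (PySem.List.pyRange 0 (order.length : Int) 1).foldl (fun acc j =>
        if i ≠ j then
          let class_i := pvClassOf (PySem.List.pyGetD order i "")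
          let class_j := pvClassOf (PySem.List.pyGetD order j "")
          if class_i ≠ class_j then
            PySem.Set.add acc (PySem.List.pyGetD order i "", PySem.List.pyGetD order j "")
          else acc
        else acc) acc)
    = (fun acc i => (order.filterMap (fun b =>
        if pvClassOf (PySem.List.pyGetD order i "") ≠ pvClassOf b
        then some (PySem.List.pyGetD order i "", b) else none)).foldl PySem.Set.add acc)
    from funext fun acc => funext fun i => hinner i acc]
  rw [pv_foldl_foldl,
    pv_range_flatMap order (fun a => order.filterMap (fun b =>
      if pvClassOf a ≠ pvClassOf b then some (a, b) else none))]
  rfl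

theorem B_eq_fold (order : List String) (h : ¬ order.length < 2) :
    get_interclass_combinations_alt order
      = (pvSeq order).foldl PySem.Set.add PySem.Set.empty := by
  unfold get_interclass_combinations_alt
  rw [if_neg h]
  simp only []
  -- tagged = order.map (fun a => (a, pvClassOf a))
  have htagged : order.zip (order.map (fun m => pvClassOf m))
      = order.map (fun a => (a, pvClassOf a)) := pv_zip_map order _
  rw [htagged]
  -- the partners dict looks up to the filtered list
  have hget : ∀ a ∈ order,
      (((PySem.List.dedup (order.map (fun m => pvClassOf m))).foldl
        (fun d l => d.insert l ((order.map (fun a => (a, pvClassOf a))).filterMap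
          (fun p => if p.2 ≠ l then some p.1 else none)))
        PySem.Dict.empty).getD (pvClassOf a) [])
      = order.filterMap (fun b => if pvClassOf b ≠ pvClassOf a then some b else none) := by
    intro a ha
    rw [pv_getD_foldl_insert _ _ _ _ _
      (by simp; exact ⟨a, ha, rfl⟩)
      (PySem.List.nodup_dedup _)]
    rw [List.filterMap_map]
    rfl
  rw [List.foldl_map]
  rw [PySem.List.foldl_congr_mem _ _ (fun acc a =>
      ((order.filterMap (fun b => if pvClassOf b ≠ pvClassOf a then some b else none)).map
        (fun b => (a, b))).foldl PySem.Set.add acc) _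
    (by
      intro acc a ha
      simp only []
      rw [hget a ha, List.foldl_map])]
  rw [pv_foldl_foldl]
  congr 1
  unfold pvSeq
  congr 1
  funext a
  rw [List.map_filterMap]
  congr 1
  funext b
  by_cases hc : pvClassOf b = pvClassOf a
  · simp [hc]
  · simp [hc, Ne.symm hc]

theorem pvSeq_small (order : List String) (h : order.length < 2) : pvSeq order = [] := by
  match order with
  | [] => rfl
  | [a] => simp [pvSeq]
  | a :: b :: t => simp at h

theorem main_eq (order : List String) :
    get_interclass_combinations order = get_interclass_combinations_alt order := by
  by_cases h : order.length < 2
  · rw [A_eq_fold, pvSeq_small order h]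
    unfold get_interclass_combinations_alt
    rw [if_pos h]
    rfl
  · rw [A_eq_fold, B_eq_fold order h]

-- ===== VERDICT (by name: the statement is the Claim_ definition above) =====
theorem get_interclass_combinations_spec : Claim_equal_get_interclass_combinations := by
  intro order _ _
  unfold Spec_get_interclass_combinations
  exact main_eq order
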